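-- pv_equiv track=rewrite | github.com/krishchopra/advent-of-code-2025 | parth/day7/solution_pt_1.py | advance_time_step
-- ===== SOURCE A (Python) =====
-- from typing import List
--
-- def advance_time_step(diagram: List[List[str]], t: int, total_beams_split: int = 0) -> int:
--     rows, cols = len(diagram), len(diagram[0])
--     # last time step, recursive base case
--     if t == rows - 1:
--         return total_beams_split
--     beam_indexes = [i for i in range(cols) if diagram[t][i] == '|' or diagram[t][i] == 'S']
--     # advance forward
--     for idx in beam_indexes:
--         if diagram[t + 1][idx] == "^": # splitter
--             diagram[t + 1][max(0, idx - 1)] = "|"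
--             diagram[t + 1][min(cols - 1, idx + 1)] = "|"
--             total_beams_split += 1
--         else:
--             diagram[t + 1][idx] = "|" # regular case
--     return advance_time_step(diagram, t + 1, total_beams_split)
-- ===== SOURCE B (Python) =====
-- from typing import List
--
-- def advance_time_step(diagram: List[List[str]], t: int, total_beams_split: int = 0) -> int:
--     # Iterative version: one for-loop over the remaining rows, fused scan (no
--     # intermediate beam_indexes list). Mutates `diagram` in place like the original.
--     rows, cols = len(diagram), len(diagram[0])
--     for r in range(t, rows - 1):
--         cur, nxt = diagram[r], diagram[r + 1]
--         for i in range(cols):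
--             if cur[i] == '|' or cur[i] == 'S':
--                 if nxt[i] == '^':
--                     nxt[max(0, i - 1)] = '|'
--                     nxt[min(cols - 1, i + 1)] = '|'
--                     total_beams_split += 1
--                 else:
--                     nxt[i] = '|'
--     return total_beams_split
-- ===== Notes on version B (the rewrite author's own statement) =====
-- stated objective: simpler
-- what changed: The tail recursion over time steps becomes a single iterative for-loop over the remaining rows, and the per-row pass is fused: no intermediate beam_indexes list is materialised, the beam test and the split/advance update happen in one scan of the row.
-- outside the precondition, e.g. on advance_time_step([['.'], []], 0, 0): A returns 0, B returns 0
import Mathlib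
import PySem

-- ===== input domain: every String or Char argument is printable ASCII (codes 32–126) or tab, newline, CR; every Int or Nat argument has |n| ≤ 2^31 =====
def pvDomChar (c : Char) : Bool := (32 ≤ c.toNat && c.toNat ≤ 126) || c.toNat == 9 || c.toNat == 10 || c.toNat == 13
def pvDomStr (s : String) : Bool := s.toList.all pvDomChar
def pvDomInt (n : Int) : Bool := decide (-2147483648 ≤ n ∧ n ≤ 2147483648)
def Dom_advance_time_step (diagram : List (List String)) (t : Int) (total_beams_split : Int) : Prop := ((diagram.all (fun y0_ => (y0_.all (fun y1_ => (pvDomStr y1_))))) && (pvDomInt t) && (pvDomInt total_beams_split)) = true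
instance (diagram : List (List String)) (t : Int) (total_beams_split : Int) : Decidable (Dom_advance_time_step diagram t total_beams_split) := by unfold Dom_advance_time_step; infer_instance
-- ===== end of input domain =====

-- B replaces A's tail recursion by one iterative loop over the remaining rows with a fused
-- per-row scan (no intermediate beam_indexes list); both mutate `diagram` identically in
-- Python (the theorems here are about the return value).


-- ===== PORT A =====
-- body of A's `for idx in beam_indexes` loop; reads/writes are exact for the in-range
-- indices Pre_ guarantees (getD "" stands for a read Python would raise on outside Pre_)
def aSplit (cols : Int) (st : List String × Int) (idx : Int) : List String × Int :=
  if (PySem.List.pyGet? st.1 idx).getD "" = "^" then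
    let r1 := PySem.List.pySetD st.1 (max 0 (idx - 1)) "|"
    let r2 := PySem.List.pySetD r1 (min (cols - 1) (idx + 1)) "|"
    (r2, st.2 + 1)
  else
    (PySem.List.pySetD st.1 idx "|", st.2)

def advance_time_step (diagram : List (List String)) (t : Int) (total_beams_split : Int) : Int :=
  let rows : Int := diagram.length
  let cols : Int := diagram.headI.length
  if t = rows - 1 then total_beams_split
  else
    match _h : PySem.List.pyGet? diagram t with
    | none => total_beams_split   -- Python raises IndexError / hits the recursion limit here: outside Pre_
    | some row =>
      let beam_indexes := (PySem.List.pyRange 0 cols 1).filter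
        (fun i => (PySem.List.pyGet? row i).getD "" == "|" || (PySem.List.pyGet? row i).getD "" == "S")
      let nxt := (PySem.List.pyGet? diagram (t + 1)).getD []
      let res := beam_indexes.foldl (aSplit cols) (nxt, total_beams_split)
      advance_time_step (PySem.List.pySetD diagram (t + 1) res.1) (t + 1) res.2
termination_by ((diagram.length : Int) - 1 - t).toNat
decreasing_by
  have hin : PySem.Raise.InRange diagram.length t := by
    by_contra hc
    rw [← PySem.List.pyGet?_eq_none_iff] at hc
    simp [hc] at _h
  simp only [PySem.List.length_pySetD]
  simp [PySem.Raise.InRange] at hin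
  omega

-- ===== PORT B =====
-- body of B's inner `for i in range(cols)` loop (fused test + update)
def bRow (cols : Int) (cur : List String) (st : List String × Int) (i : Int) : List String × Int :=
  if (PySem.List.pyGet? cur i).getD "" == "|" || (PySem.List.pyGet? cur i).getD "" == "S" then
    if (PySem.List.pyGet? st.1 i).getD "" = "^" then
      let n1 := PySem.List.pySetD st.1 (max 0 (i - 1)) "|"
      let n2 := PySem.List.pySetD n1 (min (cols - 1) (i + 1)) "|"
      (n2, st.2 + 1)
    else
      (PySem.List.pySetD st.1 i "|", st.2)
  else st

-- body of B's outer `for r in range(t, rows - 1)` loop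
def bStep (cols : Int) (st : List (List String) × Int) (r : Int) : List (List String) × Int :=
  let cur := (PySem.List.pyGet? st.1 r).getD []
  let nxt := (PySem.List.pyGet? st.1 (r + 1)).getD []
  let res := (PySem.List.pyRange 0 cols 1).foldl (bRow cols cur) (nxt, st.2)
  (PySem.List.pySetD st.1 (r + 1) res.1, res.2)

def advance_time_step_alt (diagram : List (List String)) (t : Int) (total_beams_split : Int) : Int :=
  let rows : Int := diagram.length
  let cols : Int := diagram.headI.length
  ((PySem.List.pyRange t (rows - 1) 1).foldl (bStep cols) (diagram, total_beams_split)).2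

-- ===== PRECONDITION & SPEC =====
-- Pre_ excludes exactly the inputs on which Python A does not return normally, plus ragged
-- diagrams with a row shorter than the first row at or after row t (A only survives those by
-- accident, when no beam reaches a missing cell): the empty diagram, t >= len(diagram) and
-- t < -len(diagram) (IndexError / unbounded recursion).  Negative t (Python's negative-index
-- wraparound) stays inside Pre_ and is proved equal.
def Pre_advance_time_step (diagram : List (List String)) (t : Int) (total_beams_split : Int) : Prop :=
  diagram ≠ [] ∧ -(diagram.length : Int) ≤ t ∧ t ≤ (diagram.length : Int) - 1 ∧
    (t = (diagram.length : Int) - 1 ∨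
      ∀ row ∈ diagram.drop t.toNat, diagram.headI.length ≤ row.length)
instance (diagram : List (List String)) (t : Int) (total_beams_split : Int) : Decidable (Pre_advance_time_step diagram t total_beams_split) := by unfold Pre_advance_time_step; infer_instance

def pvWitness_advance_time_step : List (List String) × Int × Int := ([["S"], ["^"], ["."]], 0, 0)

def Spec_advance_time_step (diagram : List (List String)) (t : Int) (total_beams_split : Int) (out : Int) : Prop := out = advance_time_step_alt diagram t total_beams_split
instance (diagram : List (List String)) (t : Int) (total_beams_split : Int) (out : Int) : Decidable (Spec_advance_time_step diagram t total_beams_split out) := by unfold Spec_advance_time_step; infer_instance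

-- ===== CLAIM (what is proved, stated in full; the proofs are below) =====
def Claim_equal_advance_time_step : Prop := ∀ (diagram : List (List String)) (t : Int) (total_beams_split : Int), Dom_advance_time_step diagram t total_beams_split → Pre_advance_time_step diagram t total_beams_split → Spec_advance_time_step diagram t total_beams_split (advance_time_step diagram t total_beams_split)


-- ===== LEMMAS AND PROOFS =====

-- B's fused loop body is A's loop body guarded by A's beam test
lemma bRow_eq_ite (cols : Int) (cur : List String) :
    bRow cols cur = fun st i =>
      if ((PySem.List.pyGet? cur i).getD "" == "|" || (PySem.List.pyGet? cur i).getD "" == "S") then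
        aSplit cols st i
      else st := by
  funext st i
  simp only [bRow, aSplit]

lemma headI_length_set {α : Type} [Inhabited α] (l : List (List α)) (k : Nat)
    (v : List α) (hk : k < l.length) (hv : v.length = l[k].length) :
    (l.set k v).headI.length = l.headI.length := by
  cases l with
  | nil => simp at hk
  | cons a as =>
    cases k with
    | zero => simpa using hv
    | succ k => simp [List.set]

lemma pyIdx?_lt {n : Nat} {i : Int} {k : Nat} (h : PySem.List.pyIdx? n i = some k) : k < n := by
  simp only [PySem.List.pyIdx?] at h
  split_ifs at h <;> simp_all <;> omega

lemma headI_length_pySetD (d : List (List String)) (j : Int) (v : List String)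
    (hv : v.length = ((PySem.List.pyGet? d j).getD []).length) :
    (PySem.List.pySetD d j v).headI.length = d.headI.length := by
  unfold PySem.List.pySetD PySem.List.pySet?
  cases hk : PySem.List.pyIdx? d.length j with
  | none => simp
  | some k =>
    have hklt : k < d.length := pyIdx?_lt hk
    have hget : PySem.List.pyGet? d j = some d[k] := by
      unfold PySem.List.pyGet?
      rw [hk]
      simp [List.getElem?_eq_getElem hklt]
    rw [hget] at hv
    simp only [Option.map_some, Option.getD_some]
    exact headI_length_set d k v hklt hv

lemma foldl_aSplit_length (cols : Int) :
    ∀ (l : List Int) (st : List String × Int),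
      ((l.foldl (aSplit cols) st).1).length = st.1.length := by
  intro l
  induction l with
  | nil => intro st; rfl
  | cons x xs ih =>
    intro st
    rw [List.foldl_cons, ih]
    unfold aSplit
    split <;> simp [PySem.List.length_pySetD]

lemma main_lemma (cols : Int) : ∀ (n : Nat) (d : List (List String)) (t tbs : Int),
    d ≠ [] → d.headI.length = cols → -(d.length : Int) ≤ t → t ≤ (d.length : Int) - 1 →
    n = ((d.length : Int) - 1 - t).toNat →
    advance_time_step d t tbs
      = ((PySem.List.pyRange t ((d.length : Int) - 1) 1).foldl (bStep cols) (d, tbs)).2 := by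
  intro n
  induction n with
  | zero =>
    intro d t tbs hne hcols ht0 ht1 hn
    have hlen : 0 < d.length := List.length_pos_of_ne_nil hne
    have ht : t = (d.length : Int) - 1 := by omega
    rw [advance_time_step]
    rw [ht, PySem.List.pyRange_one_eq_nil (le_refl _)]
    simp
  | succ n ih =>
    intro d t tbs hne hcols ht0 ht1 hn
    have hlen : 0 < d.length := List.length_pos_of_ne_nil hne
    have htlt : t < (d.length : Int) - 1 := by omega
    obtain ⟨row, hget⟩ : ∃ row, PySem.List.pyGet? d t = some row := by
      have hnn : PySem.List.pyGet? d t ≠ none := by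
        intro hnone
        rw [PySem.List.pyGet?_eq_none_iff, PySem.Raise.InRange] at hnone
        push Not at hnone
        omega
      exact Option.ne_none_iff_exists'.mp hnn
    -- one unfolding of A
    rw [advance_time_step]
    rw [hcols]
    rw [if_neg (by omega : ¬ t = (d.length : Int) - 1)]
    -- one unfolding of B's range
    rw [PySem.List.pyRange_one_cons htlt, List.foldl_cons]
    split
    case _ heq => rw [hget] at heq; cases heq
    case _ row' heq =>
    rw [hget] at heq
    injection heq with hrow
    subst hrow
    -- the first B step produces exactly A's updated state
    have hstep : bStep cols (d, tbs) t
        = (PySem.List.pySetD d (t + 1)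
            (((PySem.List.pyRange 0 cols 1).filter
                (fun i => (PySem.List.pyGet? row i).getD "" == "|"
                  || (PySem.List.pyGet? row i).getD "" == "S")).foldl (aSplit cols)
              ((PySem.List.pyGet? d (t + 1)).getD [], tbs)).1,
           (((PySem.List.pyRange 0 cols 1).filter
                (fun i => (PySem.List.pyGet? row i).getD "" == "|"
                  || (PySem.List.pyGet? row i).getD "" == "S")).foldl (aSplit cols)
              ((PySem.List.pyGet? d (t + 1)).getD [], tbs)).2) := by
      simp only [bStep, hget, Option.getD_some, bRow_eq_ite,
        PySem.List.foldl_if_eq_foldl_filter]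
    rw [hstep]
    -- apply the induction hypothesis to the updated diagram
    set res := ((PySem.List.pyRange 0 cols 1).filter
        (fun i => (PySem.List.pyGet? row i).getD "" == "|"
          || (PySem.List.pyGet? row i).getD "" == "S")).foldl (aSplit cols)
        ((PySem.List.pyGet? d (t + 1)).getD [], tbs) with hres
    have hlen' : (PySem.List.pySetD d (t + 1) res.1).length = d.length :=
      PySem.List.length_pySetD ..
    have hhead' : (PySem.List.pySetD d (t + 1) res.1).headI.length = cols := by
      rw [headI_length_pySetD d (t + 1) res.1 (by rw [hres, foldl_aSplit_length])]
      exact hcols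
    have hne' : PySem.List.pySetD d (t + 1) res.1 ≠ [] := by
      apply List.ne_nil_of_length_pos
      rw [hlen']
      exact hlen
    have := ih (PySem.List.pySetD d (t + 1) res.1) (t + 1) res.2 hne' hhead'
      (by rw [hlen']; omega) (by rw [hlen']; omega) (by rw [hlen']; omega)
    rw [this, hlen']

-- ===== VERDICT (by name: the statement is the Claim_ definition above) =====
theorem advance_time_step_spec : Claim_equal_advance_time_step := by
  intro d t tbs _hdom hpre
  obtain ⟨hne, ht0, ht1, _⟩ := hpre
  unfold Spec_advance_time_step advance_time_step_alt
  exact main_lemma d.headI.length (((d.length : Int) - 1 - t).toNat) d t tbs hne rfl ht0 ht1 rfl
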